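-- pv_equiv track=rewrite | github.com/pocheang/multi_agent_rag_local | app/services/ingest_service.py | _merge_records_by_id
-- ===== SOURCE A (Python) =====
-- def _merge_records_by_id(existing: list[dict], incoming: list[dict]) -> list[dict]:
--     merged: dict[str, dict] = {}
--     order: list[str] = []
--     for row in existing + incoming:
--         row_id = str(row.get("id", "") or "").strip()
--         if not row_id:
--             continue
--         if row_id not in merged:
--             order.append(row_id)
--         merged[row_id] = row
--     return [merged[row_id] for row_id in order]
-- ===== SOURCE B (Python) =====
-- def _merge_records_by_id(existing: list[dict], incoming: list[dict]) -> list[dict]: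
--     rows = existing + incoming
--     # Pass 1 (back to front): first hit wins, which is the LAST occurrence of each id.
--     last: dict[str, dict] = {}
--     for row in reversed(rows):
--         rid = str(row.get("id", "") or "").strip()
--         if rid and rid not in last:
--             last[rid] = row
--     # Pass 2 (front to back): first-appearance order of the non-empty ids.
--     seen: set[str] = set()
--     order: list[str] = []
--     for row in rows:
--         rid = str(row.get("id", "") or "").strip()
--         if rid and rid not in seen:
--             seen.add(rid)
--             order.append(rid)
--     return [last[rid] for rid in order]
-- ===== Notes on version B (the rewrite author's own statement) =====
-- stated objective: alternative
-- what changed: Replaces A's single forward pass maintaining a dict plus a parallel order list with two staged passes: a backward (reversed) scan with first-hit-wins to pick each id's last record, then a forward scan with a seen-set to collect first-appearance order, finally assembled by lookup.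
import Mathlib
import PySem

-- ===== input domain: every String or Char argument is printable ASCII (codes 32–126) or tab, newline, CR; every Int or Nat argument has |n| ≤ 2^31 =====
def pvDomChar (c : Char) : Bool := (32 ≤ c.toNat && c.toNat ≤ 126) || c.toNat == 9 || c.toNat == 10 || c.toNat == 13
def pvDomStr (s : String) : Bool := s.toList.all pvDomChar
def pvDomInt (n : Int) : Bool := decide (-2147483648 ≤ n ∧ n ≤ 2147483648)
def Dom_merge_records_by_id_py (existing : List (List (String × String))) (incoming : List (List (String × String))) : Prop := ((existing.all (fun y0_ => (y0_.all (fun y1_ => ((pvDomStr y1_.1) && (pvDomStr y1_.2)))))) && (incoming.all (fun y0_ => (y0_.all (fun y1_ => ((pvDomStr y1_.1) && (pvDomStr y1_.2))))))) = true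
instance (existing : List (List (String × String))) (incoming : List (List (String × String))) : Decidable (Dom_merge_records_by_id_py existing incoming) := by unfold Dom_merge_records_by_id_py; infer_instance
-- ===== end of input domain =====

-- B replaces A's single forward pass (dict + parallel order list, overwrite = last wins) by two
-- staged passes: a reversed first-hit-wins scan for last values and a forward seen-set scan for
-- first-appearance order; same O(n) cost, different decomposition.


-- ===== PORT A =====
-- row_id = str(row.get("id", "") or "").strip()   (row.get = first match in the assoc list;
-- the value is a string, so str(...) is the identity and `v or ""` is `if v = "" then "" else v`)
def pvRowId (row : List (String × String)) : String :=
  let v := ((row.find? (fun p => p.1 == "id")).map (·.2)).getD ""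
  PySem.Str.strip (if v = "" then "" else v)

-- one iteration of A's loop over (merged, order)
def pvStepA (s : PySem.Dict String (List (String × String)) × List String)
    (row : List (String × String)) : PySem.Dict String (List (String × String)) × List String :=
  let row_id := pvRowId row
  if row_id = "" then s
  else
    let order := if s.1.contains row_id then s.2 else s.2 ++ [row_id]
    (s.1.insert row_id row, order)

def merge_records_by_id_py (existing : List (List (String × String))) (incoming : List (List (String × String))) : List (List (String × String)) :=
  let r := (existing ++ incoming).foldl pvStepA (PySem.Dict.empty, [])
  -- merged[row_id]: the key is always present, KeyError is unreachable
  r.2.map (fun row_id => r.1.getD row_id [])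

-- ===== PORT B =====
-- pass 1 step (over reversed rows): first hit wins, never overwrite
def pvStepLast (d : PySem.Dict String (List (String × String)))
    (row : List (String × String)) : PySem.Dict String (List (String × String)) :=
  let rid := pvRowId row
  if rid = "" then d
  else if d.contains rid then d
  else d.insert rid row

-- pass 2 step: (seen set, order list)
def pvStepOrder (s : PySem.Set String × List String)
    (row : List (String × String)) : PySem.Set String × List String :=
  let rid := pvRowId row
  if rid = "" then s
  else if PySem.Set.contains s.1 rid then s
  else (PySem.Set.add s.1 rid, s.2 ++ [rid])

def merge_records_by_id_py_alt (existing : List (List (String × String))) (incoming : List (List (String × String))) : List (List (String × String)) :=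
  let rows := existing ++ incoming
  let last := rows.reverse.foldl pvStepLast PySem.Dict.empty
  let order := (rows.foldl pvStepOrder (PySem.Set.empty, [])).2
  -- last[rid]: every id in order was stored in pass 1, KeyError is unreachable
  order.map (fun rid => last.getD rid [])

-- ===== PRECONDITION & SPEC =====
def Spec_merge_records_by_id_py (existing : List (List (String × String))) (incoming : List (List (String × String))) (out : List (List (String × String))) : Prop := out = merge_records_by_id_py_alt existing incoming
instance (existing : List (List (String × String))) (incoming : List (List (String × String))) (out : List (List (String × String))) : Decidable (Spec_merge_records_by_id_py existing incoming out) := by unfold Spec_merge_records_by_id_py; infer_instance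

-- ===== CLAIM (what is proved, stated in full; the proofs are below) =====
def Claim_equal_merge_records_by_id_py : Prop := ∀ (existing : List (List (String × String))) (incoming : List (List (String × String))), Dom_merge_records_by_id_py existing incoming → Spec_merge_records_by_id_py existing incoming (merge_records_by_id_py existing incoming)

-- ===== LEMMAS AND PROOFS =====

-- the Bool predicate "this row's id is k"
def pvIs (k : String) (r : List (String × String)) : Bool := pvRowId r == k

-- A's dict after the loop answers get? k by the LAST row of l whose id is k (k nonempty)
theorem pv_A_dict (k : String) (hk : k ≠ "") :
    ∀ (l : List (List (String × String)))
      (d : PySem.Dict String (List (String × String))) (ord : List String),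
    ((l.foldl pvStepA (d, ord)).1).get? k =
      l.foldl (fun acc r => if pvIs k r then some r else acc) (d.get? k) := by
  intro l
  induction l with
  | nil => intro d ord; rfl
  | cons row rest ih =>
    intro d ord
    simp only [List.foldl_cons]
    by_cases h : pvRowId row = ""
    · have hp : pvIs k row = false := by
        unfold pvIs; rw [h]; exact beq_eq_false_iff_ne.mpr (Ne.symm hk)
      have hstep : pvStepA (d, ord) row = (d, ord) := by simp [pvStepA, h]
      rw [hstep, hp]
      simp only [Bool.false_eq_true, if_false]
      exact ih d ord
    · have hA : pvStepA (d, ord) row =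
          (d.insert (pvRowId row) row,
           if d.contains (pvRowId row) then ord else ord ++ [pvRowId row]) := by
        simp [pvStepA, h]
      have hget : (d.insert (pvRowId row) row).get? k =
          if pvIs k row = true then some row else d.get? k := by
        rw [PySem.Dict.get?_insert]
        by_cases hkr : pvRowId row = k
        · simp [pvIs, hkr]
        · simp [pvIs, hkr, Ne.symm hkr]
      rw [hA, ih, hget]

-- B's pass-1 dict (first hit wins) answers get? k by the FIRST row of l whose id is k
theorem pv_B_dict (k : String) (hk : k ≠ "") :
    ∀ (l : List (List (String × String)))
      (d : PySem.Dict String (List (String × String))),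
    (l.foldl pvStepLast d).get? k = (d.get? k).or (l.find? (pvIs k)) := by
  intro l
  induction l with
  | nil => intro d; simp
  | cons row rest ih =>
    intro d
    simp only [List.foldl_cons]
    by_cases h : pvRowId row = ""
    · have hp : pvIs k row = false := by
        unfold pvIs; rw [h]; exact beq_eq_false_iff_ne.mpr (Ne.symm hk)
      have hstep : pvStepLast d row = d := by simp [pvStepLast, h]
      rw [hstep, List.find?_cons, hp]
      exact ih d
    · by_cases hc : d.contains (pvRowId row) = true
      · have hstep : pvStepLast d row = d := by simp [pvStepLast, h, hc]
        rw [hstep, ih]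
        by_cases hkr : pvRowId row = k
        · -- d already has k, so the .or absorbs everything
          have : (d.get? k).isSome := by
            rw [← PySem.Dict.contains_eq_isSome_get?, ← hkr]; exact hc
          obtain ⟨v, hv⟩ := Option.isSome_iff_exists.mp this
          simp [hv]
        · have hp : pvIs k row = false := by simp [pvIs, hkr]
          simp [hp]
      · simp only [Bool.not_eq_true] at hc
        have hstep : pvStepLast d row = d.insert (pvRowId row) row := by
          simp [pvStepLast, h, hc]
        rw [hstep, ih]
        by_cases hkr : pvRowId row = k
        · have hget : (d.insert (pvRowId row) row).get? k = some row := by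
            rw [hkr]; exact PySem.Dict.get?_insert_self d k row
          have hnone : d.get? k = none := by
            rw [PySem.Dict.get?_eq_none_iff_contains, ← hkr]
            exact hc
          have hp : pvIs k row = true := by simp [pvIs, hkr]
          simp [hget, hnone, hp]
        · have hget : (d.insert (pvRowId row) row).get? k = d.get? k :=
            PySem.Dict.get?_insert_of_ne d row (Ne.symm hkr)
          have hp : pvIs k row = false := by simp [pvIs, hkr]
          simp [hget, hp]

-- last-match fold = first match of the reversed list
theorem pv_last_eq_rev_find (k : String) :
    ∀ (l : List (List (String × String))) (acc : Option (List (String × String))),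
    l.foldl (fun acc r => if pvIs k r then some r else acc) acc =
      (l.reverse.find? (pvIs k)).or acc := by
  intro l
  induction l with
  | nil => intro acc; simp
  | cons row rest ih =>
    intro acc
    simp only [List.foldl_cons, List.reverse_cons]
    rw [ih, List.find?_append, Option.or_assoc]
    congr 1
    by_cases hp : pvIs k row
    · simp [hp]
    · simp [hp]

-- A's order list = B's pass-2 order list, given the dict/seen-set membership invariant
theorem pv_order (l : List (List (String × String))) :
    ∀ (d : PySem.Dict String (List (String × String))) (s : PySem.Set String)
      (ord : List String),
    (∀ x, d.contains x = true ↔ x ∈ s) →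
    (l.foldl pvStepA (d, ord)).2 = (l.foldl pvStepOrder (s, ord)).2 := by
  induction l with
  | nil => intro d s ord _; rfl
  | cons row rest ih =>
    intro d s ord hinv
    simp only [List.foldl_cons]
    by_cases h : pvRowId row = ""
    · simp only [pvStepA, pvStepOrder, h]
      exact ih d s ord hinv
    · have hcc : d.contains (pvRowId row) = PySem.Set.contains s (pvRowId row) := by
        by_cases hm : pvRowId row ∈ s
        · rw [(hinv _).mpr hm, ((PySem.Set.contains_iff s _).mpr hm)]
        · have h1 : d.contains (pvRowId row) = false := by
            by_contra hne
            exact hm ((hinv _).mp (by revert hne; cases d.contains (pvRowId row) <;> simp))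
          have h2 : PySem.Set.contains s (pvRowId row) = false := by
            by_contra hne
            exact hm ((PySem.Set.contains_iff s _).mp
              (by revert hne; cases PySem.Set.contains s (pvRowId row) <;> simp))
          rw [h1, h2]
      by_cases hc : PySem.Set.contains s (pvRowId row) = true
      · have hm : pvRowId row ∈ s := (PySem.Set.contains_iff s _).mp hc
        have hstepA : pvStepA (d, ord) row = (d.insert (pvRowId row) row, ord) := by
          simp [pvStepA, h, hcc, hm]
        have hstepB : pvStepOrder (s, ord) row = (s, ord) := by
          simp [pvStepOrder, h, hm]
        rw [hstepA, hstepB]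
        apply ih
        intro x
        rw [PySem.Dict.contains_insert]
        constructor
        · intro hx
          rcases Bool.or_eq_true_iff.mp hx with hx | hx
          · rw [eq_of_beq hx]; exact (PySem.Set.contains_iff s _).mp hc
          · exact (hinv x).mp hx
        · intro hx
          exact Bool.or_eq_true_iff.mpr (Or.inr ((hinv x).mpr hx))
      · have hcf : PySem.Set.contains s (pvRowId row) = false := by
          revert hc; cases PySem.Set.contains s (pvRowId row) <;> simp
        have hm : pvRowId row ∉ s := fun hm =>
          by rw [(PySem.Set.contains_iff s _).mpr hm] at hcf; cases hcf
        have hstepA : pvStepA (d, ord) row =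
            (d.insert (pvRowId row) row, ord ++ [pvRowId row]) := by
          simp [pvStepA, h, hcc, hm]
        have hstepB : pvStepOrder (s, ord) row =
            (PySem.Set.add s (pvRowId row), ord ++ [pvRowId row]) := by
          simp [pvStepOrder, h, hm]
        rw [hstepA, hstepB]
        apply ih
        intro x
        rw [PySem.Dict.contains_insert, PySem.Set.mem_add]
        constructor
        · intro hx
          rcases Bool.or_eq_true_iff.mp hx with hx | hx
          · exact Or.inr (eq_of_beq hx)
          · exact Or.inl ((hinv x).mp hx)
        · rintro (hx | hx)
          · exact Bool.or_eq_true_iff.mpr (Or.inr ((hinv x).mpr hx))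
          · exact Bool.or_eq_true_iff.mpr (Or.inl (beq_iff_eq.mpr hx))

-- every id in A's order list is nonempty
theorem pv_order_ne (l : List (List (String × String))) :
    ∀ (d : PySem.Dict String (List (String × String))) (ord : List String),
    (∀ x ∈ ord, x ≠ "") →
    ∀ x ∈ (l.foldl pvStepA (d, ord)).2, x ≠ "" := by
  induction l with
  | nil => intro d ord h; exact h
  | cons row rest ih =>
    intro d ord h
    simp only [List.foldl_cons]
    by_cases hr : pvRowId row = ""
    · simp only [pvStepA, hr]; exact ih d ord h
    · have : pvStepA (d, ord) row =
          (d.insert (pvRowId row) row,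
           if d.contains (pvRowId row) then ord else ord ++ [pvRowId row]) := by
        simp [pvStepA, hr]
      rw [this]
      apply ih
      intro x hx
      by_cases hc : d.contains (pvRowId row) = true
      · rw [if_pos hc] at hx; exact h x hx
      · rw [if_neg hc] at hx
        rcases List.mem_append.mp hx with hx | hx
        · exact h x hx
        · rw [List.mem_singleton.mp hx]; exact hr

theorem merge_eq (existing incoming : List (List (String × String))) :
    merge_records_by_id_py existing incoming = merge_records_by_id_py_alt existing incoming := by
  unfold merge_records_by_id_py merge_records_by_id_py_alt
  simp only []
  have horder :
      ((existing ++ incoming).foldl pvStepA (PySem.Dict.empty, [])).2 =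
      ((existing ++ incoming).foldl pvStepOrder (PySem.Set.empty, [])).2 :=
    pv_order (existing ++ incoming) PySem.Dict.empty PySem.Set.empty []
      (by intro x; simp [PySem.Dict.contains_empty, PySem.Set.empty])
  rw [horder]
  apply List.map_congr_left
  intro k hk
  have hk' : k ≠ "" := by
    apply pv_order_ne (existing ++ incoming) PySem.Dict.empty []
      (by intro x hx; cases hx)
    rw [horder]; exact hk
  have hA := pv_A_dict k hk' (existing ++ incoming) PySem.Dict.empty []
  have hB := pv_B_dict k hk' (existing ++ incoming).reverse PySem.Dict.empty
  rw [PySem.Dict.getD_eq_get?_getD, PySem.Dict.getD_eq_get?_getD, hA, hB,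
      PySem.Dict.get?_empty, pv_last_eq_rev_find]
  simp

-- ===== VERDICT (by name: the statement is the Claim_ definition above) =====
theorem merge_records_by_id_py_spec : Claim_equal_merge_records_by_id_py := by
  intro existing incoming _
  exact merge_eq existing incoming
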